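-- pv_equiv track=rewrite | github.com/errorlike/cs61a | hog/hog.py | sus_points
-- ===== SOURCE A (Python) =====
-- def is_prime(n):
--     """Return whether N is prime."""
--     if n == 1:
--         return False
--     k = 2
--     while k < n:
--         if n % k == 0:
--             return False
--         k += 1
--     return True
--
-- def num_factors(n):
--     """Return the number of factors of N, including 1 and N itself."""
--     # BEGIN PROBLEM 4
--     "*** YOUR CODE HERE ***"
--     counter = 0
--     for i in range(1, n + 1):
--         if n % i == 0:
--             counter += 1
--     return counter
--
-- def sus_points(score):
--     """Return the new score of a player taking into account the Sus Fuss rule."""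
--     # BEGIN PROBLEM 4
--     "*** YOUR CODE HERE ***"
--     factors_nums = num_factors(score)
--     if factors_nums == 3 or factors_nums == 4:
--         score += 1
--         while not is_prime(score):
--             score += 1
--         return score
--     else:
--         return score
-- ===== SOURCE B (Python) =====
-- def _is_prime_fast(n):
--     """Trial division up to sqrt(n)."""
--     if n < 2:
--         return False
--     d = 2
--     while d * d <= n:
--         if n % d == 0:
--             return False
--         d += 1
--     return True
--
-- def sus_points(score):
--     """Return the new score of a player taking into account the Sus Fuss rule."""
--     # count divisors via the multiplicative formula over the prime factorization
--     if score > 0: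
--         m, d, count = score, 2, 1
--         while d * d <= m:
--             if m % d == 0:
--                 e = 0
--                 while m % d == 0:
--                     m //= d
--                     e += 1
--                 count *= e + 1
--             d += 1
--         if m > 1:
--             count *= 2
--     else:
--         count = 0
--     if count == 3 or count == 4:
--         score += 1
--         while not _is_prime_fast(score):
--             score += 1
--     return score
-- ===== Notes on version B (the rewrite author's own statement) =====
-- stated objective: faster
-- what changed: Divisor count is computed from the prime factorization (trial division to sqrt, multiplying exponent+1) instead of testing every i in 1..n, and the next-prime search tests primality by trial division up to sqrt(n) instead of scanning all k < n.
import Mathlib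
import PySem

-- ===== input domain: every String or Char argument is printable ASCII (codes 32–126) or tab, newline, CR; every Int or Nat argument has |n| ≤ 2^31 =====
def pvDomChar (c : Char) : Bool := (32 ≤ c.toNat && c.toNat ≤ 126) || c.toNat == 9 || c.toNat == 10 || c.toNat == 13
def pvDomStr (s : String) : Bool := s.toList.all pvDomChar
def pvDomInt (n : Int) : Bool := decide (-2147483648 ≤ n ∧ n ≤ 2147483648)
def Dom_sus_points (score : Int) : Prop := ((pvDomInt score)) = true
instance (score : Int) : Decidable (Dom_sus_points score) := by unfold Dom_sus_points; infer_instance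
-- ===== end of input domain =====

-- B replaces A's O(n) divisor scan with a sqrt-time prime factorization (multiplying exponent+1)
-- and A's O(n) primality scan with trial division up to sqrt; objective: faster.
-- Both next-prime loops use the same Nat fuel (score.toNat + 2), which only makes them total.

-- ===== PORT A =====
-- while k < n: if n % k == 0: return False; k += 1   (from is_prime; the Nat fuel only makes the
-- loop total — it is always at least the number of remaining iterations, so it never cuts it short)
def isPrimeLoopA : Nat → Int → Int → Bool
  | 0, _, _ => true
  | fuel + 1, n, k =>
    if k < n then
      if PySem.Int.mod n k == 0 then false
      else isPrimeLoopA fuel n (k + 1)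
    else true

def is_primeA (n : Int) : Bool := if n == 1 then false else isPrimeLoopA (n - 2).toNat n 2

def num_factorsA (n : Int) : Int :=
  (PySem.List.pyRange 1 (n + 1) 1).foldl
    (fun counter i => if PySem.Int.mod n i == 0 then counter + 1 else counter) 0

-- score += 1; while not is_prime(score): score += 1  (fuel only makes the loop total)
def susLoopA : Nat → Int → Int
  | 0, s => s
  | fuel + 1, s => if is_primeA s then s else susLoopA fuel (s + 1)

def sus_points (score : Int) : Int :=
  let factors_nums := num_factorsA score
  if factors_nums == 3 || factors_nums == 4 then susLoopA (score.toNat + 2) (score + 1)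
  else score

-- ===== PORT B =====
-- inner loop: while m % d == 0: m //= d; e += 1   (again the Nat fuel only makes the loop total:
-- it is always at least the number of remaining iterations at every reachable call)
def extractB : Nat → Int → Int → Int → Int × Int
  | 0, m, _, e => (m, e)
  | fuel + 1, m, d, e =>
    if PySem.Int.mod m d == 0 then extractB fuel (PySem.Int.floordiv m d) d (e + 1)
    else (m, e)

-- outer loop: while d*d <= m: …; returns (m, count) (fuel as above)
def countLoopB : Nat → Int → Int → Int → Int × Int
  | 0, m, _, count => (m, count)
  | fuel + 1, m, d, count =>
    if d * d ≤ m then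
      if PySem.Int.mod m d == 0 then
        countLoopB fuel (extractB m.toNat m d 0).1 (d + 1) (count * ((extractB m.toNat m d 0).2 + 1))
      else countLoopB fuel m (d + 1) count
    else (m, count)

def primeLoopB : Nat → Int → Int → Bool
  | 0, _, _ => true
  | fuel + 1, n, d =>
    if d * d ≤ n then
      if PySem.Int.mod n d == 0 then false else primeLoopB fuel n (d + 1)
    else true

def is_prime_fastB (n : Int) : Bool := if n < 2 then false else primeLoopB n.toNat n 2

def susLoopB : Nat → Int → Int
  | 0, s => s
  | fuel + 1, s => if is_prime_fastB s then s else susLoopB fuel (s + 1)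

def countB (score : Int) : Int :=
  if score > 0 then
    if 1 < (countLoopB score.toNat score 2 1).1 then (countLoopB score.toNat score 2 1).2 * 2
    else (countLoopB score.toNat score 2 1).2
  else 0

def sus_points_alt (score : Int) : Int :=
  if countB score == 3 || countB score == 4 then susLoopB (score.toNat + 2) (score + 1)
  else score

-- ===== PRECONDITION & SPEC =====
def Spec_sus_points (score : Int) (out : Int) : Prop := out = sus_points_alt score
instance (score : Int) (out : Int) : Decidable (Spec_sus_points score out) := by unfold Spec_sus_points; infer_instance

-- ===== CLAIM (what is proved, stated in full; the proofs are below) =====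
def Claim_equal_sus_points : Prop := ∀ (score : Int), Dom_sus_points score → Spec_sus_points score (sus_points score)

-- ===== LEMMAS AND PROOFS =====

-- Finset/List bridge: counting over List.range is filtering Finset.range
theorem card_filter_range_eq_countP (N : Nat) (p : Nat → Bool) :
    ((Finset.range N).filter (fun k => p k = true)).card = (List.range N).countP p := by
  induction N with
  | zero => rfl
  | succ n ih =>
    rw [Finset.range_add_one, List.range_succ, List.countP_append, Finset.filter_insert]
    split
    · rw [Finset.card_insert_of_notMem (by simp)]; simp_all
    · simp_all

-- the divisors of N are exactly the k+1, k ∈ range N, with (k+1) ∣ N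
theorem card_divisors_eq_card_filter (N : Nat) (hN : 0 < N) :
    N.divisors.card = ((Finset.range N).filter (fun k => (decide ((k+1) ∣ N)) = true)).card := by
  refine Finset.card_bij' (fun d _ => d - 1) (fun k _ => k + 1) ?_ ?_ ?_ ?_
  · intro d hd
    rw [Nat.mem_divisors] at hd
    have h1 : 1 ≤ d := Nat.one_le_iff_ne_zero.mpr (by rintro rfl; exact hd.2 (Nat.eq_zero_of_zero_dvd hd.1))
    have h2 : d ≤ N := Nat.le_of_dvd hN hd.1
    simp only [Finset.mem_filter, Finset.mem_range, decide_eq_true_eq]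
    constructor
    · omega
    · rw [Nat.sub_add_cancel h1]; exact hd.1
  · intro k hk
    simp only [Finset.mem_filter, Finset.mem_range, decide_eq_true_eq] at hk
    exact Nat.mem_divisors.mpr ⟨hk.2, by omega⟩
  · intro d hd
    rw [Nat.mem_divisors] at hd
    have h1 : 1 ≤ d := Nat.one_le_iff_ne_zero.mpr (by rintro rfl; exact hd.2 (Nat.eq_zero_of_zero_dvd hd.1))
    show d - 1 + 1 = d
    omega
  · intro k _; show k + 1 - 1 = k; omega

-- A's num_factors computes the divisor count
theorem numFactorsA_eq (n : Int) : num_factorsA n = ((n.toNat).divisors.card : Int) := by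
  rcases le_or_gt n 0 with h | h
  · have h0 : (n + 1 - 1).toNat = 0 := by omega
    have h1 : n.toNat = 0 := by omega
    simp [num_factorsA, PySem.List.pyRange_one, h1]
  · have hcast : n = (n.toNat : Int) := by omega
    rw [num_factorsA, PySem.List.pyRange_one, PySem.List.foldl_count_if, List.countP_map]
    have h0 : (n + 1 - 1).toNat = n.toNat := by omega
    rw [h0]
    set N := n.toNat with hN
    have hpt : ((fun i => PySem.Int.mod n i == 0) ∘ fun k : Nat => (1:Int) + ↑k)
        = fun k : Nat => decide ((k+1) ∣ N) := by
      funext k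
      have hk : (1:Int) + ↑k = ((k+1 : Nat) : Int) := by push_cast; ring
      apply Bool.eq_iff_iff.mpr
      simp only [Function.comp_apply, hk, hcast, beq_iff_eq,
        PySem.Int.mod_eq_zero_iff_dvd, decide_eq_true_eq]
      exact Int.natCast_dvd_natCast
    rw [hpt, ← card_filter_range_eq_countP,
      ← card_divisors_eq_card_filter N (by omega)]
    omega

-- extractB: full extraction of the factor d
theorem extractB_spec : ∀ fuel : Nat, ∀ m d e : Int, m.toNat ≤ fuel → 1 ≤ m → 2 ≤ d →
    1 ≤ (extractB fuel m d e).1 ∧ ¬ (d ∣ (extractB fuel m d e).1) ∧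
      ∃ j : ℕ, (extractB fuel m d e).2 = e + j ∧ m = d ^ j * (extractB fuel m d e).1 := by
  intro fuel
  induction fuel with
  | zero => intro m d e hf hm hd; omega
  | succ f ih =>
    intro m d e hf hm hd
    by_cases hmod : PySem.Int.mod m d == 0
    · have hdvd : d ∣ m := (PySem.Int.mod_eq_zero_iff_dvd m d).mp (by simpa using hmod)
      have hfd : PySem.Int.floordiv m d = m / d := PySem.Int.floordiv_eq_ediv_of_pos (by omega)
      have ht : d * (m / d) = m := Int.mul_ediv_cancel' hdvd
      have h1 : 1 ≤ m / d := by nlinarith [Int.ediv_nonneg (by omega : (0:Int) ≤ m) (by omega : (0:Int) ≤ d)]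
      have h2 : m / d < m := by nlinarith
      have hstep : extractB (f + 1) m d e = extractB f (PySem.Int.floordiv m d) d (e + 1) := by
        simp [extractB, hmod]
      rw [hstep]
      have := ih (PySem.Int.floordiv m d) d (e + 1) (by rw [hfd]; omega) (by rw [hfd]; omega) hd
      obtain ⟨hm', hnd, j, hj, heq⟩ := this
      refine ⟨hm', hnd, j + 1, by omega, ?_⟩
      set X := (extractB f (PySem.Int.floordiv m d) d (e + 1)).1 with hX
      have heq' : m / d = d ^ j * X := by rw [← hfd]; exact heq
      rw [heq'] at ht
      rw [← ht]; ring
    · have hstep : extractB (f + 1) m d e = (m, e) := by simp [extractB, hmod]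
      rw [hstep]
      exact ⟨hm, fun hc => hmod (by simp [(PySem.Int.mod_eq_zero_iff_dvd m d).mpr hc]), 0, by simp, by ring⟩

-- divisor count of a prime power times a coprime part
theorem tau_prime_pow_mul (q M : Nat) (hq : q.Prime) (j : Nat) (hnd : ¬ q ∣ M) :
    ((q ^ j * M).divisors).card = (j + 1) * M.divisors.card := by
  rw [Nat.Coprime.card_divisors_mul ((hq.coprime_iff_not_dvd.mpr hnd).pow_left j)]
  simp [Nat.divisors_prime_pow hq]

-- at loop exit (d*d > m) m is 1 or prime, so the trailing m>1 test finishes the divisor count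
theorem countExit (m d c : Int) (hm : 1 ≤ m) (hd : 2 ≤ d) (hdd : ¬ d * d ≤ m)
    (hinv : ∀ k : Int, 2 ≤ k → k ∣ m → d ≤ k) :
    (if 1 < m then c * 2 else c) = c * ((m.toNat).divisors.card : Int) := by
  rcases lt_or_ge 1 m with h1 | h1
  · have hp : m.toNat.Prime := by
      by_contra hp
      have hq : m.toNat.minFac ∣ m.toNat := Nat.minFac_dvd _
      have hqp : m.toNat.minFac.Prime := Nat.minFac_prime (by omega)
      have hsq : m.toNat.minFac ^ 2 ≤ m.toNat := Nat.minFac_sq_le_self (by omega) hp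
      have hqd : (m.toNat.minFac : Int) ∣ m := by
        rw [show m = ((m.toNat : Nat) : Int) by omega, Int.natCast_dvd_natCast]; exact hq
      have h2 : d ≤ (m.toNat.minFac : Int) := hinv _ (by exact_mod_cast hqp.two_le) hqd
      have h3 : ((m.toNat.minFac ^ 2 : Nat) : Int) ≤ m := by
        rw [show m = ((m.toNat : Nat) : Int) by omega]; exact_mod_cast hsq
      push_cast at h3
      nlinarith
    rw [if_pos h1, Nat.Prime.divisors hp,
      Finset.card_insert_of_notMem (by simp; omega)]
    simp
  · have hm1 : m = 1 := by omega
    simp [hm1]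

-- countLoopB finished by the m>1 test computes count · τ(m), given no divisor of m in [2, d)
theorem countLoopB_spec : ∀ fuel : Nat, ∀ m d c : Int, (m + 1 - d).toNat ≤ fuel →
    1 ≤ m → 2 ≤ d → (∀ k : Int, 2 ≤ k → k ∣ m → d ≤ k) →
    (if 1 < (countLoopB fuel m d c).1 then (countLoopB fuel m d c).2 * 2 else (countLoopB fuel m d c).2)
      = c * ((m.toNat).divisors.card : Int) := by
  intro fuel
  induction fuel with
  | zero =>
    intro m d c hf hm hd hinv
    -- the fuel is exhausted only when d > m, so the guard is false
    have hdm : m + 1 ≤ d := by omega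
    have hdd : ¬ (d * d ≤ m) := by intro hc; nlinarith
    simpa [countLoopB] using countExit m d c hm hd hdd hinv
  | succ f ih =>
    intro m d c hf hm hd hinv
    by_cases hg : d * d ≤ m
    · rw [show countLoopB (f + 1) m d c
          = (if PySem.Int.mod m d == 0 then
              countLoopB f (extractB m.toNat m d 0).1 (d + 1) (c * ((extractB m.toNat m d 0).2 + 1))
            else countLoopB f m (d + 1) c) by simp [countLoopB, hg]]
      by_cases hmod : PySem.Int.mod m d == 0
      · rw [if_pos hmod]
        have hdvd : d ∣ m := (PySem.Int.mod_eq_zero_iff_dvd m d).mp (by simpa using hmod)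
        obtain ⟨hm1', hnd, j, hj, heq⟩ :=
          extractB_spec m.toNat m d 0 (le_refl _) hm hd
        set m' := (extractB m.toNat m d 0).1 with hm'
        -- d is prime: every divisor k ≥ 2 of d divides m, hence k ≥ d; and k ≤ d
        have hdprime : d.toNat.Prime := by
          rw [Nat.prime_def]
          refine ⟨by omega, fun k hk => ?_⟩
          rcases Nat.eq_zero_or_pos k with rfl | hk0
          · exfalso; have := Nat.eq_zero_of_zero_dvd hk; omega
          rcases Nat.lt_or_ge k 2 with hk2 | hk2
          · left; omega
          · right
            have hkd : (k : Int) ∣ d := by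
              rwa [show d = ((d.toNat : Nat) : Int) by omega, Int.natCast_dvd_natCast]
            have h1 : d ≤ (k : Int) := hinv k (by exact_mod_cast hk2) (hkd.trans hdvd)
            have h2 : (k : Int) ≤ d := Int.le_of_dvd (by omega) hkd
            omega
        -- j ≥ 1 since d ∣ m but ¬ d ∣ m'
        have hj1 : 1 ≤ j := by
          rcases Nat.eq_zero_or_pos j with rfl | h; · simp [heq] at hdvd; exact absurd hdvd hnd
          · omega
        have hm'le : m' < m := by
          have hd2 : (2:Int) ≤ d ^ j := le_trans (by omega) (le_self_pow₀ (by omega) (by omega))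
          nlinarith [heq]
        -- recurse
        have hrec := ih m' (d + 1) (c * ((extractB m.toNat m d 0).2 + 1))
          (by omega) hm1' (by omega) ?_
        · rw [hrec, hj]
          -- cast m = d^j * m' to Nat and apply the τ formula
          have hcast : m.toNat = d.toNat ^ j * m'.toNat := by
            have : ((d.toNat ^ j * m'.toNat : Nat) : Int) = d ^ j * m' := by
              push_cast
              rw [Int.toNat_of_nonneg (by omega), Int.toNat_of_nonneg (by omega)]
            omega
          rw [hcast, tau_prime_pow_mul d.toNat m'.toNat hdprime j
            (by rw [show d = ((d.toNat : Nat) : Int) by omega, show m' = ((m'.toNat : Nat) : Int) by omega,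
                  Int.natCast_dvd_natCast] at hnd; exact hnd)]
          push_cast
          ring
        · -- invariant for m', d+1
          intro k hk2 hkm'
          have hkm : k ∣ m := by rw [heq]; exact hkm'.mul_left _
          have h1 : d ≤ k := hinv k hk2 hkm
          rcases lt_or_ge d k with h | h; · omega
          · exfalso; have : k = d := by omega
            subst this; exact hnd hkm'
      · rw [if_neg hmod]
        refine ih m (d + 1) c (by omega) hm (by omega) ?_
        intro k hk2 hkm
        have h1 : d ≤ k := hinv k hk2 hkm
        rcases lt_or_ge d k with h | h; · omega
        · exfalso
          have : k = d := by omega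
          subst this
          exact hmod (by simp [(PySem.Int.mod_eq_zero_iff_dvd m k).mpr hkm])
    · simpa [countLoopB, hg] using countExit m d c hm hd hg hinv

-- B's count is the divisor count too
theorem countB_eq (score : Int) : countB score = ((score.toNat).divisors.card : Int) := by
  rcases le_or_gt score 0 with h | h
  · have : score.toNat = 0 := by omega
    simp [countB, this, not_lt.mpr h]
  · have := countLoopB_spec score.toNat score 2 1 (by omega) (by omega) (by omega)
      (fun k hk _ => hk)
    rw [countB, if_pos (by omega)]
    simpa using this

-- A's inner primality loop
theorem isPrimeLoopA_iff : ∀ fuel : Nat, ∀ n k : Int, (n - k).toNat ≤ fuel →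
    (isPrimeLoopA fuel n k = true ↔ ∀ j : Int, k ≤ j → j < n → ¬ j ∣ n) := by
  intro fuel
  induction fuel with
  | zero =>
    intro n k hf
    constructor
    · intro _ j hj1 hj2; omega
    · intro _; rfl
  | succ f ih =>
    intro n k hf
    by_cases hk : k < n
    · by_cases hmod : PySem.Int.mod n k == 0
      · rw [show isPrimeLoopA (f + 1) n k = false by simp [isPrimeLoopA, hk, hmod]]
        constructor
        · intro hc; cases hc
        · intro hall
          exact absurd ((PySem.Int.mod_eq_zero_iff_dvd n k).mp (by simpa using hmod))
            (hall k le_rfl hk)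
      · rw [show isPrimeLoopA (f + 1) n k = isPrimeLoopA f n (k + 1) by simp [isPrimeLoopA, hk, hmod]]
        rw [ih n (k + 1) (by omega)]
        constructor
        · intro hall j hj1 hj2
          rcases eq_or_lt_of_le hj1 with rfl | hlt
          · intro hc; exact hmod (by simp [(PySem.Int.mod_eq_zero_iff_dvd n k).mpr hc])
          · exact hall j (by omega) hj2
        · intro hall j hj1 hj2; exact hall j (by omega) hj2
    · rw [show isPrimeLoopA (f + 1) n k = true by simp [isPrimeLoopA, hk]]
      constructor
      · intro _ j hj1 hj2; omega
      · intro _; rfl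

-- B's primality loop
theorem primeLoopB_iff : ∀ fuel : Nat, ∀ n d : Int, (n + 1 - d).toNat ≤ fuel → 2 ≤ d →
    (primeLoopB fuel n d = true ↔ ∀ j : Int, d ≤ j → j * j ≤ n → ¬ j ∣ n) := by
  intro fuel
  induction fuel with
  | zero =>
    intro n d hf hd2
    have hnd : n + 1 ≤ d := by omega
    constructor
    · intro _ j hj1 hj2
      exfalso; nlinarith
    · intro _; rfl
  | succ f ih =>
    intro n d hf hd2
    by_cases hdd : d * d ≤ n
    · by_cases hmod : PySem.Int.mod n d == 0
      · rw [show primeLoopB (f + 1) n d = false by simp [primeLoopB, hdd, hmod]]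
        constructor
        · intro hc; cases hc
        · intro hall
          exact absurd ((PySem.Int.mod_eq_zero_iff_dvd n d).mp (by simpa using hmod))
            (hall d le_rfl hdd)
      · rw [show primeLoopB (f + 1) n d = primeLoopB f n (d + 1) by simp [primeLoopB, hdd, hmod]]
        rw [ih n (d + 1) (by omega) (by omega)]
        constructor
        · intro hall j hj1 hj2
          rcases eq_or_lt_of_le hj1 with rfl | hlt
          · intro hc; exact hmod (by simp [(PySem.Int.mod_eq_zero_iff_dvd n d).mpr hc])
          · exact hall j (by omega) hj2
        · intro hall j hj1 hj2; exact hall j (by omega) hj2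
    · rw [show primeLoopB (f + 1) n d = true by simp [primeLoopB, hdd]]
      constructor
      · intro _ j hj1 hj2
        exfalso
        have : d * d ≤ j * j := by nlinarith
        omega
      · intro _; rfl

-- for n ≥ 2 both primality tests decide Nat.Prime n.toNat
theorem is_primeA_iff (n : Int) (h2 : 2 ≤ n) : is_primeA n = true ↔ n.toNat.Prime := by
  rw [is_primeA, if_neg (by simp; omega), isPrimeLoopA_iff (n - 2).toNat n 2 (le_refl _)]
  constructor
  · intro hall
    rw [Nat.prime_def_lt]
    refine ⟨by omega, fun m hm hdvd => ?_⟩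
    by_contra hne
    have hm0 : m ≠ 0 := by rintro rfl; have := Nat.eq_zero_of_zero_dvd hdvd; omega
    have hm2 : 2 ≤ m := by omega
    exact hall (m : Int) (by exact_mod_cast hm2) (by omega)
      (by rw [show n = ((n.toNat : Nat) : Int) by omega, Int.natCast_dvd_natCast]; exact hdvd)
  · intro hp j hj1 hj2 hdvd
    have hjn : j.toNat ∣ n.toNat := by
      rw [show n = ((n.toNat : Nat) : Int) by omega, show j = ((j.toNat : Nat) : Int) by omega,
        Int.natCast_dvd_natCast] at hdvd
      exact hdvd
    have := (Nat.prime_def_lt.mp hp).2 j.toNat (by omega) hjn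
    omega

theorem is_prime_fastB_iff (n : Int) (h2 : 2 ≤ n) : is_prime_fastB n = true ↔ n.toNat.Prime := by
  rw [is_prime_fastB, if_neg (by omega), primeLoopB_iff n.toNat n 2 (by omega) le_rfl]
  constructor
  · intro hall
    by_contra hp
    have hq : n.toNat.minFac ∣ n.toNat := Nat.minFac_dvd _
    have hqp : n.toNat.minFac.Prime := Nat.minFac_prime (by omega)
    have hsq : n.toNat.minFac ^ 2 ≤ n.toNat := Nat.minFac_sq_le_self (by omega) hp
    refine hall (n.toNat.minFac : Int) (by exact_mod_cast hqp.two_le) ?_ ?_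
    · have : ((n.toNat.minFac ^ 2 : Nat) : Int) ≤ n := by
        rw [show n = ((n.toNat : Nat) : Int) by omega]; exact_mod_cast hsq
      push_cast at this; nlinarith
    · rw [show n = ((n.toNat : Nat) : Int) by omega, Int.natCast_dvd_natCast]; exact hq
  · intro hp j hj1 hj2 hdvd
    have hjn : j.toNat ∣ n.toNat := by
      rw [show n = ((n.toNat : Nat) : Int) by omega, show j = ((j.toNat : Nat) : Int) by omega,
        Int.natCast_dvd_natCast] at hdvd
      exact hdvd
    rcases (Nat.Prime.eq_one_or_self_of_dvd hp) j.toNat hjn with h | h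
    · omega
    · have : 2 ≤ j := hj1
      have : n ≤ j := by omega
      nlinarith

theorem prime_tests_eq (s : Int) (h2 : 2 ≤ s) : is_primeA s = is_prime_fastB s := by
  rw [Bool.eq_iff_iff, is_primeA_iff s h2, is_prime_fastB_iff s h2]

theorem susLoop_eq : ∀ fuel : Nat, ∀ s : Int, 2 ≤ s → susLoopA fuel s = susLoopB fuel s := by
  intro fuel
  induction fuel with
  | zero => intro s _; rfl
  | succ f ih =>
    intro s hs
    rw [susLoopA, susLoopB, prime_tests_eq s hs]
    split
    · rfl
    · exact ih (s + 1) (by omega)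

-- ===== VERDICT (by name: the statement is the Claim_ definition above) =====
theorem sus_points_spec : Claim_equal_sus_points := by
  intro score _
  unfold Spec_sus_points
  by_cases hc : ((((score.toNat.divisors.card : Nat) : Int) == 3)
      || (((score.toNat.divisors.card : Nat) : Int) == 4)) = true
  · -- the branch fires, so the divisor count is ≥ 3, hence score ≥ 1 and score + 1 ≥ 2
    have h1 : 1 ≤ score := by
      by_contra h
      have h0 : score.toNat = 0 := by omega
      rw [h0] at hc
      simp at hc
    simp only [sus_points, sus_points_alt, numFactorsA_eq, countB_eq]
    rw [if_pos hc, if_pos hc]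
    exact susLoop_eq (score.toNat + 2) (score + 1) (by omega)
  · simp only [sus_points, sus_points_alt, numFactorsA_eq, countB_eq]
    rw [if_neg hc, if_neg hc]
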